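-- pv_equiv track=rewrite | github.com/Bae-Sangbin/CodingTest-Baekjoon-Programmers- | 프로그래머스/unrated/181932. 코드 처리하기/코드 처리하기.py | solution
-- ===== SOURCE A (Python) =====
-- def solution(code):
--     mode = 0
--     ret = ''
--     ret = []
--     code = list(code)
--     for idx in range(len(code)):
--         if code[idx] == '1':
--             if mode == 0:
--                 mode = 1
--             elif mode == 1:
--                 mode = 0
--         else:
--             if mode == 0:
--                 if not code[idx] == 1:
--                     if idx % 2 == 0:
--                         ret.append(code[idx])
--                 else:
--                     mode = 1
--             elif mode == 1:
--                 if not code[idx] == 1: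
--                     if idx % 2 == 1:
--                         ret.append(code[idx])
--                 else:
--                     mode = 0
--     if ret == []:
--         return 'EMPTY'
--     return ''.join(ret)
-- ===== SOURCE B (Python) =====
-- def solution(code):
--     kept = [c for c in code if c != '1']
--     out = ''.join(kept[::2])
--     return out if out else 'EMPTY'
-- ===== Notes on version B (the rewrite author's own statement) =====
-- stated objective: simpler
-- what changed: A's stateful loop (a mode bit toggled by each one-character plus an index-parity test per branch) is replaced by the closed-form observation that a character survives iff it is not the toggle character and an even number of earlier surviving candidates precede it, so B just deletes the toggle characters and takes every second remaining character with a slice.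
import Mathlib
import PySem

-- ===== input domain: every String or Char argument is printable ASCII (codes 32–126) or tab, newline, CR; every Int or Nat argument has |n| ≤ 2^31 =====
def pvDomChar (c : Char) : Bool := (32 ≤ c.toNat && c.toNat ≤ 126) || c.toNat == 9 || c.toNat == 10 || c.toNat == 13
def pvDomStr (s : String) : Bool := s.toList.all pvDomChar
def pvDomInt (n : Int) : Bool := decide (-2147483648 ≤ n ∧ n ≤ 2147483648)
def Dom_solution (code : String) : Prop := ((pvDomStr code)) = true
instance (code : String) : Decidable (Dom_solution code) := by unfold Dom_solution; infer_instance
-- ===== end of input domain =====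

-- B replaces A's stateful mode-toggle loop by "delete the '1' characters, then keep every
-- second remaining character" (objective: simpler).

-- ===== PORT A =====
-- A's loop body: state (mode, ret), reads idx and code[idx].
-- The Python branch `if not code[idx] == 1` compares a str with the int 1, always True,
-- so its else arm is dead and the condition is ported as the constant it is.
def solutionStep (st : Int × List Char) (idx : Int) (c : Char) : Int × List Char :=
  let (mode, ret) := st
  if c == '1' then
    if mode == 0 then (1, ret)
    else if mode == 1 then (0, ret)
    else (mode, ret)
  else
    if mode == 0 then
      if PySem.Int.mod idx 2 == 0 then (mode, ret ++ [c]) else (mode, ret)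
    else if mode == 1 then
      if PySem.Int.mod idx 2 == 1 then (mode, ret ++ [c]) else (mode, ret)
    else (mode, ret)

def solution (code : String) : String :=
  let codeL := code.toList
  -- for idx in range(len(code)): every idx is in range, so pyGetD's default is never read
  let st := (PySem.List.pyRange 0 (codeL.length : Int) 1).foldl
    (fun st idx => solutionStep st idx (PySem.List.pyGetD codeL idx ' '))
    ((0 : Int), ([] : List Char))
  if st.2 == [] then "EMPTY" else String.ofList st.2   -- ''.join(ret)

-- ===== PORT B =====
def solution_alt (code : String) : String :=
  let kept := code.toList.filter (fun c => c != '1')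
  -- kept[::2]: step 2 ≠ 0, so slice? is always `some`
  let out := (PySem.List.slice? kept none none 2).getD []
  if out == [] then "EMPTY" else String.ofList out

-- ===== PRECONDITION & SPEC =====
def Spec_solution (code : String) (out : String) : Prop := out = solution_alt code
instance (code : String) (out : String) : Decidable (Spec_solution code out) := by unfold Spec_solution; infer_instance

-- ===== CLAIM (what is proved, stated in full; the proofs are below) =====
def Claim_equal_solution : Prop := ∀ (code : String), Dom_solution code → Spec_solution code (solution code)

-- ===== LEMMAS AND PROOFS =====

-- every second element, starting with the first
def everyOther : List Char → List Char
  | [] => []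
  | [a] => [a]
  | a :: _ :: t => a :: everyOther t

lemma everyOther_cons (a : Char) (l : List Char) :
    everyOther (a :: l) = a :: everyOther (l.drop 1) := by
  cases l <;> simp [everyOther]

-- what A's loop appends while scanning l, given b = (current index parity matches mode)
def pickA (l : List Char) (b : Bool) : List Char :=
  match l with
  | [] => []
  | c :: t =>
    if c = '1' then pickA t b
    else if b then c :: pickA t (!b) else pickA t (!b)

lemma pickA_spec (l : List Char) :
    pickA l true = everyOther (l.filter (fun c => c != '1')) ∧
    pickA l false = everyOther ((l.filter (fun c => c != '1')).drop 1) := by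
  induction l with
  | nil => simp [pickA, everyOther]
  | cons c t ih =>
    by_cases hc : c = '1'
    · simp [pickA, hc, ih.1, ih.2]
    · simp [pickA, hc, everyOther_cons, ih.1, ih.2]

lemma loopA (l : List Char) : ∀ (i m : Int) (acc : List Char), (m = 0 ∨ m = 1) →
    ∃ m', (m' = 0 ∨ m' = 1) ∧
      (PySem.List.enumerate l i).foldl (fun st p => solutionStep st p.1 p.2) (m, acc)
        = (m', acc ++ pickA l ((i % 2 : Int) == m)) := by
  induction l with
  | nil => intro i m acc hm; exact ⟨m, hm, by simp [PySem.List.enumerate_nil, pickA]⟩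
  | cons c t ih =>
    intro i m acc hm
    rw [PySem.List.enumerate_cons, List.foldl_cons]
    have hpar : (i % 2 : Int) = 0 ∨ (i % 2 : Int) = 1 := by omega
    by_cases hc : c = '1'
    · -- mode toggles, kept-parity relation is preserved
      rcases hm with hm | hm <;> subst hm
      · obtain ⟨m', hm', heq⟩ := ih (i+1) 1 acc (Or.inr rfl)
        refine ⟨m', hm', ?_⟩
        rw [show solutionStep (0, acc) (i, c).1 (i, c).2 = (1, acc) by simp [solutionStep, hc], heq]
        have hb : (((i+1) % 2 : Int) == 1) = ((i % 2 : Int) == 0) := by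
          rcases hpar with h | h <;>
            simp [h, show ((i+1) % 2 : Int) = 1 - i % 2 by omega]
        rw [hb, show pickA (c :: t) ((i % 2 : Int) == 0) = pickA t ((i % 2 : Int) == 0)
              by simp [pickA, hc]]
      · obtain ⟨m', hm', heq⟩ := ih (i+1) 0 acc (Or.inl rfl)
        refine ⟨m', hm', ?_⟩
        rw [show solutionStep (1, acc) (i, c).1 (i, c).2 = (0, acc) by simp [solutionStep, hc], heq]
        have hb : (((i+1) % 2 : Int) == 0) = ((i % 2 : Int) == 1) := by
          rcases hpar with h | h <;>
            simp [h, show ((i+1) % 2 : Int) = 1 - i % 2 by omega]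
        rw [hb, show pickA (c :: t) ((i % 2 : Int) == 1) = pickA t ((i % 2 : Int) == 1)
              by simp [pickA, hc]]
    · -- mode unchanged, index parity flips, so the match-bool flips
      have hflip : ∀ m0 : Int, (m0 = 0 ∨ m0 = 1) →
          (((i+1) % 2 : Int) == m0) = !((i % 2 : Int) == m0) := by
        intro m0 hm0
        rcases hpar with h | h <;> rcases hm0 with h0 | h0 <;> subst h0 <;>
          simp [h, show ((i+1) % 2 : Int) = 1 - i % 2 by omega]
      rcases hm with hm | hm <;> subst hm
      · by_cases hp : (i % 2 : Int) = 0
        · obtain ⟨m', hm', heq⟩ := ih (i+1) 0 (acc ++ [c]) (Or.inl rfl)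
          refine ⟨m', hm', ?_⟩
          rw [show solutionStep (0, acc) (i, c).1 (i, c).2 = (0, acc ++ [c])
                by simp [solutionStep, hc, hp], heq]
          simp [pickA, hc, hp, hflip 0 (Or.inl rfl)]
        · obtain ⟨m', hm', heq⟩ := ih (i+1) 0 acc (Or.inl rfl)
          refine ⟨m', hm', ?_⟩
          rw [show solutionStep (0, acc) (i, c).1 (i, c).2 = (0, acc)
                by simp [solutionStep, hc, hp], heq]
          simp [pickA, hc, hp, hflip 0 (Or.inl rfl)]
      · by_cases hp : (i % 2 : Int) = 1
        · obtain ⟨m', hm', heq⟩ := ih (i+1) 1 (acc ++ [c]) (Or.inr rfl)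
          refine ⟨m', hm', ?_⟩
          rw [show solutionStep (1, acc) (i, c).1 (i, c).2 = (1, acc ++ [c])
                by simp [solutionStep, hc, hp], heq]
          simp [pickA, hc, hp, hflip 1 (Or.inr rfl)]
        · obtain ⟨m', hm', heq⟩ := ih (i+1) 1 acc (Or.inr rfl)
          refine ⟨m', hm', ?_⟩
          rw [show solutionStep (1, acc) (i, c).1 (i, c).2 = (1, acc)
                by simp [solutionStep, hc, hp], heq]
          simp [pickA, hc, hp, hflip 1 (Or.inr rfl)]

-- kept[::2] computed by slice?: the Nat-level core
lemma filterMap_range_everyOther (xs : List Char) :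
    List.filterMap (fun k => xs[2*k]?) (List.range ((xs.length + 1) / 2)) = everyOther xs := by
  induction xs using everyOther.induct with
  | case1 => rfl
  | case2 a => simp [everyOther, List.range_succ]
  | case3 a b t ih =>
    have hcount : ((a :: b :: t).length + 1) / 2 = ((t.length + 1) / 2) + 1 := by
      simp; omega
    rw [hcount, List.range_succ_eq_map, List.filterMap_cons, List.filterMap_map]
    have h0 : (a :: b :: t)[2*0]? = some a := by simp
    rw [h0]
    have hfun : (fun k => (a :: b :: t)[2*k]?) ∘ Nat.succ = fun k => t[2*k]? := by
      funext k
      simp [Nat.mul_succ]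
    rw [hfun, ih, everyOther]

lemma slice_two (xs : List Char) :
    PySem.List.slice? xs none none 2 = some (everyOther xs) := by
  rw [PySem.List.slice?, PySem.List.sliceIndices]
  simp only [show ¬((2:Int) = 0) from by norm_num, if_false, show ¬((2:Int) < 0) from by norm_num,
    show (0:Int) < 2 from by norm_num, if_true]
  rw [← filterMap_range_everyOther xs]
  by_cases h : 0 < xs.length
  · have h1 : (0:Int) < (xs.length : Int) := by exact_mod_cast h
    simp only [h1, if_true]
    have hc : (((xs.length : Int) - 0 + 2 - 1) / 2).toNat = (xs.length + 1) / 2 := by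
      omega
    rw [hc]
    congr 1
    apply List.filterMap_congr
    intro k _
    congr 1
    omega
  · have h0 : xs.length = 0 := by omega
    have h1 : ¬((0:Int) < (xs.length : Int)) := by simp [h0]
    simp [h0]

-- ===== VERDICT (by name: the statement is the Claim_ definition above) =====
theorem solution_spec : Claim_equal_solution := by
  intro code _
  unfold Spec_solution solution solution_alt
  obtain ⟨m', _, heq⟩ := loopA code.toList 0 0 [] (Or.inl rfl)
  rw [PySem.List.enumerate_eq_map_pyRange code.toList ' ', List.foldl_map] at heq
  simp only [PySem.List.len] at heq
  rw [show ((0:Int) % 2 == (0:Int)) = true from rfl, List.nil_append,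
    (pickA_spec code.toList).1] at heq
  simp only [slice_two, Option.getD_some, heq]
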